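-- pv_equiv track=rewrite | github.com/ggfincke/loom | src/core/edit_helpers.py | check_range_usage
-- ===== SOURCE A (Python) =====
-- from typing import List, Optional, Tuple
--
-- def check_range_usage(
--     start: int,
--     end: int,
--     line_usage: dict[int, str],
--     op_type: str,
--     op_index: int,
-- ) -> List[str]:
--     warnings: List[str] = []
--
--     # check for duplicates first
--     for line in range(start, end + 1):
--         if line in line_usage:
--             warnings.append(f"Op {op_index}: duplicate operation on line {line}")
--             break  # only report first duplicate
--
--     # mark all lines as used regardless
--     for line in range(start, end + 1):
--         line_usage[line] = op_type
--
--     return warnings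
-- ===== SOURCE B (Python) =====
-- def check_range_usage(start, end, line_usage, op_type, op_index):
--     rng = range(start, end + 1)
--     overlap = set(rng) & line_usage.keys()
--     warnings = (
--         [f"Op {op_index}: duplicate operation on line {min(overlap)}"]
--         if overlap else []
--     )
--     line_usage.update((line, op_type) for line in rng)
--     return warnings
-- ===== Notes on version B (the rewrite author's own statement) =====
-- stated objective: idiomatic
-- what changed: Replaces the explicit first-duplicate scanning loop and the per-line marking loop with a set intersection of the range and the dict's keys (warning on min(overlap), which is the ascending scan's first hit) plus one bulk dict.update.
import Mathlib
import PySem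

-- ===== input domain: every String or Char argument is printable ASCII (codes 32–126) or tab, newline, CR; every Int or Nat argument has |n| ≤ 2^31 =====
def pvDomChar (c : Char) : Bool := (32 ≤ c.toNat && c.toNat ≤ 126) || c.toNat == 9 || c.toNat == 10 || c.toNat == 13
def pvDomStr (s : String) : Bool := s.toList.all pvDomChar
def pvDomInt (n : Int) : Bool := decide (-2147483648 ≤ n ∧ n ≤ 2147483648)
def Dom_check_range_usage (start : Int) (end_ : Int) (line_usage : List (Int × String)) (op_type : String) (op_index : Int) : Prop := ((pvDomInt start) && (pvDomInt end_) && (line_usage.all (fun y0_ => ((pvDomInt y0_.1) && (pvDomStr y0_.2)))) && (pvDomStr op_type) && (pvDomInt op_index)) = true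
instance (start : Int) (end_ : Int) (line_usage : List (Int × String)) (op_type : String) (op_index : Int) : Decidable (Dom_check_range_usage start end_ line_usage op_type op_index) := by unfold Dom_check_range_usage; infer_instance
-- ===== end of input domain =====

-- B replaces A's two scanning loops (first-duplicate scan with break, per-line marking)
-- by a set intersection of the range with the dict's keys plus one bulk update; the
-- equivalence proved here is about the RETURN value only (both Pythons also mutate
-- line_usage identically: every line of the range is mapped to op_type).

-- ===== PORT A =====
-- the first loop: 'for line in range(start, end+1): if line in line_usage: append; break'
def crLoopA (lines : List Int) (line_usage : List (Int × String)) (op_index : Int) : List String :=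
  match lines with
  | [] => []
  | l :: rest =>
      if line_usage.any (fun p => p.1 == l) then
        ["Op " ++ PySem.Int.toStr op_index ++ ": duplicate operation on line " ++ PySem.Int.toStr l]
      else crLoopA rest line_usage op_index

-- the second Python loop only mutates line_usage (line_usage[line] = op_type) and does not
-- touch the returned warnings list, so it contributes nothing to the return value ported here.
def check_range_usage (start : Int) (end_ : Int) (line_usage : List (Int × String)) (op_type : String) (op_index : Int) : List String :=
  crLoopA (PySem.List.pyRange start (end_ + 1) 1) line_usage op_index

-- ===== PORT B =====
-- overlap = set(range(start, end+1)) & line_usage.keys(); min(overlap) is consumed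
-- order-independently (min with no key). The bulk update mutates line_usage only.
def check_range_usage_alt (start : Int) (end_ : Int) (line_usage : List (Int × String)) (op_type : String) (op_index : Int) : List String :=
  match PySem.List.min?
      (PySem.Set.inter (PySem.Set.ofList (PySem.List.pyRange start (end_ + 1) 1))
        (line_usage.map (fun p => p.1)) : PySem.Set Int)
      (fun x => x) with
  | some m => ["Op " ++ PySem.Int.toStr op_index ++ ": duplicate operation on line " ++ PySem.Int.toStr m]
  | none => []

-- ===== PRECONDITION & SPEC =====
def Spec_check_range_usage (start : Int) (end_ : Int) (line_usage : List (Int × String)) (op_type : String) (op_index : Int) (out : List String) : Prop := out = check_range_usage_alt start end_ line_usage op_type op_index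
instance (start : Int) (end_ : Int) (line_usage : List (Int × String)) (op_type : String) (op_index : Int) (out : List String) : Decidable (Spec_check_range_usage start end_ line_usage op_type op_index out) := by unfold Spec_check_range_usage; infer_instance

-- ===== CLAIM (what is proved, stated in full; the proofs are below) =====
def Claim_equal_check_range_usage : Prop := ∀ (start : Int) (end_ : Int) (line_usage : List (Int × String)) (op_type : String) (op_index : Int), Dom_check_range_usage start end_ line_usage op_type op_index → Spec_check_range_usage start end_ line_usage op_type op_index (check_range_usage start end_ line_usage op_type op_index)

-- ===== LEMMAS AND PROOFS =====

-- A's scanning loop returns the message for the FIRST line of `lines` whose key is used.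
theorem crLoopA_eq_head_filter (lines : List Int) (lu : List (Int × String)) (oi : Int) :
    crLoopA lines lu oi =
      match (lines.filter (fun l => lu.any (fun p => p.1 == l))).head? with
      | some m => ["Op " ++ PySem.Int.toStr oi ++ ": duplicate operation on line " ++ PySem.Int.toStr m]
      | none => [] := by
  induction lines with
  | nil => rfl
  | cons l rest ih =>
    by_cases h : lu.any (fun p => p.1 == l) = true
    · simp [crLoopA, h]
    · simp [crLoopA, h, ih]

-- min with no key over a strictly increasing list is its head.
theorem min?_eq_head?_of_pairwise (L : List Int) (h : L.Pairwise (· < ·)) :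
    PySem.List.min? L (fun x => x) = L.head? := by
  cases L with
  | nil => rfl
  | cons x t =>
    rw [PySem.List.min?_id_cons]
    simp only [List.head?, Option.some.injEq]
    have hx : ∀ y ∈ t, x ≤ y := fun y hy => le_of_lt ((List.pairwise_cons.mp h).1 y hy)
    rcases PySem.List.foldl_min_mem t x with h1 | h1
    · exact h1
    · exact le_antisymm (PySem.List.foldl_min_le t x).1 (hx _ h1)

-- B's overlap set, as a list, is the filtered range in ascending order.
theorem overlap_eq_filter (start end_ : Int) (lu : List (Int × String)) :
    (PySem.Set.inter (PySem.Set.ofList (PySem.List.pyRange start (end_ + 1) 1)) (lu.map (fun p => p.1)) : List Int)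
      = (PySem.List.pyRange start (end_ + 1) 1).filter (fun l => lu.any (fun p => p.1 == l)) := by
  rw [PySem.Set.ofList_eq_self_of_nodup _ (PySem.List.nodup_pyRange_one start (end_ + 1))]
  simp only [PySem.Set.inter]
  refine List.filter_congr ?_
  intro x _
  rw [Bool.eq_iff_iff]
  simp [List.mem_map]

-- ===== VERDICT (by name: the statement is the Claim_ definition above) =====
theorem check_range_usage_spec : Claim_equal_check_range_usage := by
  intro start end_ line_usage op_type op_index _
  unfold Spec_check_range_usage check_range_usage check_range_usage_alt
  rw [overlap_eq_filter, crLoopA_eq_head_filter,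
    min?_eq_head?_of_pairwise _ (List.Pairwise.filter _ (PySem.List.pairwise_lt_pyRange_one start (end_ + 1)))]
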